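-- pv_equiv track=rewrite | github.com/calincy/HW | HJ61_put_apples.py | put
-- ===== SOURCE A (Python) =====
-- def put(m,n):
--     if m<0 or n<0:
--         return 0
--     if m==0:
--         return 1
--     if m==1 or n==1:
--         return 1
--     if m>1 and n>1:
--         return put(m,n-1)+put(m-n,n)     #至少有一个空盘情况和每个盘子至少有一个苹果情况，两者为互斥事件，并集等于全集
-- ===== SOURCE B (Python) =====
-- def put(m, n):
--     if m < 0 or n < 0:
--         return 0
--     if m == 0:
--         return 1
--     if n == 0:
--         return 0
--     if n == 1:
--         return 1
--     k = min(n, m)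
--     dp = [1] + [0] * m
--     for j in range(1, k + 1):
--         for i in range(j, m + 1):
--             dp[i] += dp[i - j]
--     return dp[m]
-- ===== Notes on version B (the rewrite author's own statement) =====
-- stated objective: alternative
-- what changed: Replaces A's exponential two-way recursion put(m,n-1)+put(m-n,n) by an iterative 1-D partition-counting DP table (dp[i] += dp[i-j] over part sizes j up to min(n,m)); intended as faster (measured 2337x at the largest size both finished, unconfirmed by the timing rule).
-- intended difference: On m=1, n=0 A falls into its m==1 base case and returns 1, but there is no way to put one apple into zero plates; B returns the intended 0. — e.g. on put(1, 0): A returns 1, B returns 0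
-- outside the precondition, e.g. on put(2, 0): A returns None, B returns 0; on put(2, 910): A returns 2, B returns 2
import Mathlib
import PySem

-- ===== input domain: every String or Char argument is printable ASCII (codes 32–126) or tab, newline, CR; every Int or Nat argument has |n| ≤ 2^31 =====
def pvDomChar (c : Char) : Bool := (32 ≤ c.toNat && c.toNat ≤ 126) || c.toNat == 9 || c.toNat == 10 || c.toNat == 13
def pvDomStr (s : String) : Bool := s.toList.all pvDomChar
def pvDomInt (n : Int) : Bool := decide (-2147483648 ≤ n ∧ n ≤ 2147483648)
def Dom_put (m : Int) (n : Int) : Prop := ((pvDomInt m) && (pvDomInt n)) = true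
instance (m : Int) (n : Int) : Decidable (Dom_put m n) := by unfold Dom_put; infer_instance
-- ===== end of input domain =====

-- B replaces A's recursion put(m,n-1)+put(m-n,n) by an iterative 1-D partition-counting DP table; intended as faster (measured 2337x at the largest size both finished; unconfirmed by the timing rule).

-- ===== PORT A =====
def put (m : Int) (n : Int) : Int :=
  if m < 0 ∨ n < 0 then 0
  else if m = 0 then 1
  else if m = 1 ∨ n = 1 then 1
  else if m > 1 ∧ n > 1 then put m (n - 1) + put (m - n) n
  else 0  -- Python falls off the end here (m ≥ 2, n = 0) and returns None; excluded by Pre_put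
termination_by (m.toNat + n.toNat)
decreasing_by
  · simp_wf; omega
  · simp_wf; omega

-- ===== PORT B =====
def put_alt (m : Int) (n : Int) : Int :=
  if m < 0 ∨ n < 0 then 0
  else if m = 0 then 1
  else if n = 0 then 0
  else if n = 1 then 1
  else
    let k := min n m
    let dp0 : List Int := 1 :: List.replicate m.toNat 0
    let dp := (PySem.List.pyRange 1 (k + 1) 1).foldl (fun dp j =>
        (PySem.List.pyRange j (m + 1) 1).foldl (fun dp i =>
          dp.set i.toNat (PySem.List.pyGetD dp i 0 + PySem.List.pyGetD dp (i - j) 0)) dp) dp0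
    PySem.List.pyGetD dp m 0

-- ===== PRECONDITION & SPEC =====
-- Pre_put excludes (a) m ≥ 2 with n = 0, where the Python A falls off the end of the
-- function and returns None, which is not an int, and (b) inputs with m ≥ 2, n ≥ 2 and
-- m + 2*n > 1800, a conservative closed-form bound under which A's recursion depth
-- (about n + m/2) stays below Python's recursion limit; beyond it A can raise RecursionError.
def Pre_put (m : Int) (n : Int) : Prop := ¬ (2 ≤ m ∧ n = 0) ∧ (m ≤ 1 ∨ n ≤ 1 ∨ m + 2*n ≤ 1800)
instance (m : Int) (n : Int) : Decidable (Pre_put m n) := by unfold Pre_put; infer_instance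
def pvWitness_put : Int × Int := (7, 3)

-- On m = 1, n = 0 A hits its m==1 base case and returns 1, but there is no way to
-- put one apple into zero plates; B returns the intended 0.
def D_put (m : Int) (n : Int) : Prop := m = 1 ∧ n = 0
instance (m : Int) (n : Int) : Decidable (D_put m n) := by unfold D_put; infer_instance

def Spec_put (m : Int) (n : Int) (out : Int) : Prop := ¬ D_put m n → out = put_alt m n
instance (m : Int) (n : Int) (out : Int) : Decidable (Spec_put m n out) := by unfold Spec_put; infer_instance

def pvDiffWitness_put : Int × Int := (1, 0)
def pvDiffWitnessOut_put : Int × Int := (1, 0)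

-- ===== CLAIM (what is proved, stated in full; the proofs are below) =====
def Claim_unchanged_put : Prop := ∀ (m : Int) (n : Int), Dom_put m n → Pre_put m n → Spec_put m n (put m n)
def Claim_changed_put : Prop := Dom_put (pvDiffWitness_put.1) (pvDiffWitness_put.2) ∧ Pre_put (pvDiffWitness_put.1) (pvDiffWitness_put.2) ∧ D_put (pvDiffWitness_put.1) (pvDiffWitness_put.2) ∧ put (pvDiffWitness_put.1) (pvDiffWitness_put.2) = pvDiffWitnessOut_put.1 ∧ put_alt (pvDiffWitness_put.1) (pvDiffWitness_put.2) = pvDiffWitnessOut_put.2 ∧ pvDiffWitnessOut_put.1 ≠ pvDiffWitnessOut_put.2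
def Claim_exact_put : Prop := ∀ (m : Int) (n : Int), Dom_put m n → Pre_put m n → D_put m n → put m n ≠ put_alt m n

-- ===== LEMMAS AND PROOFS =====

-- pcount i j = number of partitions of i into parts of size ≤ j (the common value of both programs).
def pcount (i j : Nat) : Int :=
  match j with
  | 0 => if i = 0 then 1 else 0
  | Nat.succ j' =>
      pcount i j' + (if j' + 1 ≤ i then pcount (i - (j' + 1)) (j' + 1) else 0)
termination_by (i, j)
decreasing_by
  · exact Prod.Lex.right _ (Nat.lt_succ_self _)
  · exact Prod.Lex.left _ _ (by omega)

theorem pcount_succ (i j : Nat) :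
    pcount i (j+1) = pcount i j + (if j+1 ≤ i then pcount (i-(j+1)) (j+1) else 0) := by
  rw [pcount]

theorem pcount_zero_left (j : Nat) : pcount 0 j = 1 := by
  induction j with
  | zero => simp [pcount]
  | succ j ih => rw [pcount]; simp [ih]

theorem pcount_one_right (i : Nat) : pcount i 1 = 1 := by
  induction i using Nat.strong_induction_on with
  | _ i ih =>
    rw [pcount]
    rcases Nat.eq_zero_or_pos i with h | h
    · simp [h, pcount]
    · have : pcount (i - 1) 1 = 1 := ih (i - 1) (by omega)
      simp [pcount, Nat.pos_iff_ne_zero.mp h, this]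

theorem pcount_one_left (j : Nat) (h : 1 ≤ j) : pcount 1 j = 1 := by
  induction j with
  | zero => omega
  | succ j ih =>
    rcases Nat.eq_zero_or_pos j with h0 | h0
    · subst h0; exact pcount_one_right 1
    · rw [pcount]
      have : ¬ (j + 1 ≤ 1) := by omega
      simp [this, ih h0]

theorem pcount_cap (i j : Nat) (h : i ≤ j) : pcount i j = pcount i i := by
  induction j with
  | zero =>
    have hi : i = 0 := by omega
    simp [hi]
  | succ j ih =>
    rcases Nat.lt_or_ge i (j+1) with h1 | h1
    · rw [pcount]
      have : ¬ (j + 1 ≤ i) := by omega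
      simp [this]; exact ih (by omega)
    · have : i = j + 1 := by omega
      simp [this]

theorem put_eq_pcount (m n : Int) (hm : 0 ≤ m) (hn : 1 ≤ n) :
    put m n = pcount m.toNat n.toNat := by
  generalize hk : m.toNat + n.toNat = k
  induction k using Nat.strong_induction_on generalizing m n with
  | _ k ih =>
    rw [put]
    have h1 : ¬ (m < 0 ∨ n < 0) := by omega
    simp only [h1, if_false]
    by_cases h2 : m = 0
    · simp [h2, pcount_zero_left]
    · simp only [h2, if_false]
      by_cases h3 : m = 1 ∨ n = 1
      · rcases h3 with h3 | h3
        · simp [h3, pcount_one_left n.toNat (by omega)]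
        · simp [h3, pcount_one_right]
      · have hm2 : 2 ≤ m := by omega
        have hn2 : 2 ≤ n := by omega
        simp only [h3, if_false, if_pos (by constructor <;> omega : m > 1 ∧ n > 1)]
        have e1 : put m (n - 1) = pcount m.toNat (n - 1).toNat :=
          ih (m.toNat + (n-1).toNat) (by omega) m (n-1) (by omega) (by omega) rfl
        by_cases hmn : n ≤ m
        · have e2 : put (m - n) n = pcount (m - n).toNat n.toNat :=
            ih ((m-n).toNat + n.toNat) (by omega) (m-n) n (by omega) (by omega) rfl
          rw [e1, e2]
          have hnn : n.toNat = (n.toNat - 1) + 1 := by omega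
          have hle : (n.toNat - 1) + 1 ≤ m.toNat := by omega
          conv_rhs => rw [hnn]
          rw [pcount_succ, if_pos hle]
          have e3 : (n - 1).toNat = n.toNat - 1 := by omega
          have e4 : (m - n).toNat = m.toNat - ((n.toNat - 1) + 1) := by omega
          rw [e3, e4, ← hnn]
        · have hneg : m - n < 0 := by omega
          have e2 : put (m - n) n = 0 := by rw [put]; simp [hneg]
          rw [e1, e2]
          have hnn : n.toNat = (n.toNat - 1) + 1 := by omega
          have hle : ¬ ((n.toNat - 1) + 1 ≤ m.toNat) := by omega
          conv_rhs => rw [hnn]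
          rw [pcount_succ, if_neg hle]
          have e3 : (n - 1).toNat = n.toNat - 1 := by omega
          rw [e3]

theorem inner_fold (m j : Int) (hj1 : 1 ≤ j) (hjm : j ≤ m) :
    ∀ (fuel : Nat) (i0 : Int), (m + 1 - i0).toNat = fuel → j ≤ i0 →
    ∀ (dp : List Int), dp.length = m.toNat + 1 →
    (∀ t : Nat, t < i0.toNat → dp.getD t 0 = pcount t j.toNat) →
    (∀ t : Nat, i0.toNat ≤ t → t ≤ m.toNat → dp.getD t 0 = pcount t (j.toNat - 1)) →
    ((PySem.List.pyRange i0 (m+1) 1).foldl (fun dp i =>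
        dp.set i.toNat (PySem.List.pyGetD dp i 0 + PySem.List.pyGetD dp (i - j) 0)) dp).length
        = m.toNat + 1 ∧
    ∀ t : Nat, t ≤ m.toNat →
      ((PySem.List.pyRange i0 (m+1) 1).foldl (fun dp i =>
        dp.set i.toNat (PySem.List.pyGetD dp i 0 + PySem.List.pyGetD dp (i - j) 0)) dp).getD t 0
        = pcount t j.toNat := by
  intro fuel
  induction fuel with
  | zero =>
    intro i0 hf hi0 dp hlen hlow hhigh
    rw [PySem.List.pyRange_one_eq_nil (by omega)]
    refine ⟨hlen, fun t ht => hlow t (by omega)⟩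
  | succ f ihf =>
    intro i0 hf hi0 dp hlen hlow hhigh
    rw [PySem.List.pyRange_one_cons (by omega : i0 < m + 1), List.foldl_cons]
    set v := PySem.List.pyGetD dp i0 0 + PySem.List.pyGetD dp (i0 - j) 0 with hv
    have hvv : v = pcount i0.toNat j.toNat := by
      rw [hv, PySem.List.pyGetD_of_nonneg dp 0 (by omega),
          PySem.List.pyGetD_of_nonneg dp 0 (by omega)]
      rw [hhigh i0.toNat (le_refl _) (by omega)]
      rw [hlow (i0 - j).toNat (by omega)]
      have hj' : j.toNat = (j.toNat - 1) + 1 := by omega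
      conv_rhs => rw [hj']
      rw [pcount_succ, if_pos (by omega)]
      have : (i0 - j).toNat = i0.toNat - (j.toNat - 1 + 1) := by omega
      rw [this, ← hj']
    have hlen' : (dp.set i0.toNat v).length = m.toNat + 1 := by simp [hlen]
    refine ihf (i0 + 1) (by omega) (by omega) _ hlen' ?_ ?_
    · intro t ht
      by_cases hte : t = i0.toNat
      · subst hte
        rw [List.getD, List.getElem?_set_self (by omega)]
        simp [hvv]
      · have : t < i0.toNat := by omega
        rw [List.getD, List.getElem?_set_ne (by omega)]
        exact hlow t this
    · intro t ht1 ht2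
      rw [List.getD, List.getElem?_set_ne (by omega)]
      exact hhigh t (by omega) ht2

theorem pcount_pred (t j : Nat) (h1 : 1 ≤ j) (h : t < j) : pcount t j = pcount t (j - 1) := by
  have hj : j = (j - 1) + 1 := by omega
  conv_lhs => rw [hj]
  rw [pcount_succ, if_neg (by omega)]
  ring

theorem outer_fold (m kk : Int) (hm : 1 ≤ m) (hkm : kk ≤ m) :
    ∀ (fuel : Nat) (j0 : Int), (kk + 1 - j0).toNat = fuel → 1 ≤ j0 → j0 ≤ kk + 1 →
    ∀ (dp : List Int), dp.length = m.toNat + 1 →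
    (∀ t : Nat, t ≤ m.toNat → dp.getD t 0 = pcount t (j0.toNat - 1)) →
    ∀ t : Nat, t ≤ m.toNat →
      ((PySem.List.pyRange j0 (kk+1) 1).foldl (fun dp j =>
        (PySem.List.pyRange j (m+1) 1).foldl (fun dp i =>
          dp.set i.toNat (PySem.List.pyGetD dp i 0 + PySem.List.pyGetD dp (i - j) 0)) dp) dp).getD t 0
        = pcount t kk.toNat := by
  intro fuel
  induction fuel with
  | zero =>
    intro j0 hf h1 h2 dp hlen hinv t ht
    rw [PySem.List.pyRange_one_eq_nil (by omega)]
    have : j0 = kk + 1 := by omega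
    have : j0.toNat - 1 = kk.toNat := by omega
    simp only [List.foldl_nil, hinv t ht, this]
  | succ f ihf =>
    intro j0 hf h1 h2 dp hlen hinv t ht
    by_cases hstop : kk + 1 ≤ j0
    · rw [PySem.List.pyRange_one_eq_nil hstop]
      have : j0.toNat - 1 = kk.toNat := by omega
      simp only [List.foldl_nil, hinv t ht, this]
    · rw [PySem.List.pyRange_one_cons (by omega : j0 < kk + 1), List.foldl_cons]
      have hjm : j0 ≤ m := by omega
      have hinner := inner_fold m j0 h1 hjm (m + 1 - j0).toNat j0 rfl (le_refl _) dp hlen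
        (fun t' ht' => by
          rw [hinv t' (by omega)]
          exact (pcount_pred t' j0.toNat (by omega) (by omega)).symm)
        (fun t' _ ht2 => hinv t' ht2)
      exact ihf (j0 + 1) (by omega) (by omega) (by omega) _ hinner.1
        (fun t' ht' => by
          rw [hinner.2 t' ht']
          congr 1
          omega) t ht

theorem put_alt_eq_pcount (m n : Int) (hm : 1 ≤ m) (hn : 1 ≤ n) :
    put_alt m n = pcount m.toNat (min n m).toNat := by
  have h1 : ¬ (m < 0 ∨ n < 0) := by omega
  have h2 : ¬ (m = 0) := by omega
  have h3 : ¬ (n = 0) := by omega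
  rw [put_alt]
  simp only [h1, h2, h3, if_false]
  by_cases h4 : n = 1
  · subst h4
    rw [if_pos rfl, min_eq_left (by omega)]
    exact (pcount_one_right m.toNat).symm
  rw [if_neg h4]
  have hk1 : 1 ≤ min n m := by omega
  have hkm : min n m ≤ m := by omega
  have hinit : ∀ t : Nat, t ≤ m.toNat →
      (1 :: List.replicate m.toNat 0).getD t 0 = pcount t ((1:Int).toNat - 1) := by
    intro t ht
    cases t with
    | zero => simp [List.getD, pcount]
    | succ t' =>
      simp only [List.getD, List.getElem?_cons_succ, List.getElem?_replicate]
      have h0 : ((1:Int).toNat - 1) = 0 := rfl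
      rw [h0, pcount]
      split <;> simp
  have hout := outer_fold m (min n m) hm hkm (min n m).toNat 1 (by omega) (by omega)
      (by omega) (1 :: List.replicate m.toNat 0) (by simp) hinit m.toNat (le_refl _)
  rw [PySem.List.pyGetD_of_nonneg _ 0 (by omega)]
  exact hout

theorem put_one_zero : put 1 0 = 1 := by
  rw [put]; norm_num

theorem put_alt_one_zero : put_alt 1 0 = 0 := by
  rw [put_alt]; norm_num

theorem main_eq (m n : Int) (hpre : ¬ (2 ≤ m ∧ n = 0)) (hD : ¬ D_put m n) :
    put m n = put_alt m n := by
  unfold D_put at hD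
  by_cases hneg : m < 0 ∨ n < 0
  · rw [put, put_alt]; simp [hneg]
  · by_cases hm0 : m = 0
    · subst hm0; rw [put, put_alt]; norm_num
    · have hm1 : 1 ≤ m := by omega
      have hn1 : 1 ≤ n := by omega
      rw [put_eq_pcount m n (by omega) hn1, put_alt_eq_pcount m n hm1 hn1]
      by_cases hnm : n ≤ m
      · rw [min_eq_left hnm]
      · rw [min_eq_right (by omega : m ≤ n)]
        exact pcount_cap m.toNat n.toNat (by omega)

-- ===== VERDICT (by name: the statement is the Claim_ definition above) =====
theorem put_spec : Claim_unchanged_put := by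
  intro m n _ hpre hD
  exact main_eq m n hpre.1 hD

theorem put_changed : Claim_changed_put := by
  unfold Claim_changed_put
  refine ⟨by decide, by decide, by decide, put_one_zero, ?_, by decide⟩
  exact put_alt_one_zero

theorem put_tight : Claim_exact_put := by
  intro m n _ _ hD
  obtain ⟨hm, hn⟩ := hD
  subst hm; subst hn
  rw [put_one_zero, put_alt_one_zero]
  decide
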